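-- pv_equiv track=rewrite | github.com/TrainingByPackt/Artificial-Intelligence-and-Machine-Learning-Fundamentals | Lesson 2/Activity 07/tictactoe6.py | utilityMatrix
-- ===== SOURCE A (Python) =====
-- ComboIndices = [
--     [0, 1, 2],
--     [3, 4, 5],
--     [6, 7, 8],
--     [0, 3, 6],
--     [1, 4, 7],
--     [2, 5, 8],
--     [0, 4, 8],
--     [2, 4, 6]
-- ]
--
-- EMPTY_SIGN = '.'
--
-- AI_SIGN = 'X'
--
-- OPPONENT_SIGN = 'O'
--
-- def initUtilityMatrix(Board):
--     return [0 if cell == EMPTY_SIGN else -1 for cell in Board]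
--
-- def generateAddScore(Utilities, i, j, k):
--     def addScore(points):
--         if Utilities[i] >= 0:
--             Utilities[i] += points
--         if Utilities[j] >= 0:
--             Utilities[j] += points
--         if Utilities[k] >= 0:
--             Utilities[k] += points
--     return addScore
--
-- def utilityMatrix(Board):
--     Utilities = initUtilityMatrix(Board)
--     for [i, j, k] in ComboIndices:
--         addScore = generateAddScore(Utilities, i, j, k)
--         Triple = [Board[i], Board[j], Board[k]]
--         if Triple.count(EMPTY_SIGN) == 1:
--             if Triple.count(AI_SIGN) == 2:
--                 addScore(1000)
--             elif Triple.count(OPPONENT_SIGN) == 2: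
--                 addScore(100)
--         elif Triple.count(EMPTY_SIGN) == 2 and Triple.count(AI_SIGN) == 1:
--             addScore(10)
--         elif Triple.count(EMPTY_SIGN) == 3:
--             addScore(1)
--     return Utilities
-- ===== SOURCE B (Python) =====
-- ComboIndices = [
--     [0, 1, 2],
--     [3, 4, 5],
--     [6, 7, 8],
--     [0, 3, 6],
--     [1, 4, 7],
--     [2, 5, 8],
--     [0, 4, 8],
--     [2, 4, 6]
-- ]
--
-- EMPTY_SIGN = '.'
--
-- AI_SIGN = 'X'
--
-- OPPONENT_SIGN = 'O'
--
-- def comboPoints(Triple):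
--     empties = Triple.count(EMPTY_SIGN)
--     if empties == 1:
--         if Triple.count(AI_SIGN) == 2:
--             return 1000
--         if Triple.count(OPPONENT_SIGN) == 2:
--             return 100
--         return 0
--     if empties == 2 and Triple.count(AI_SIGN) == 1:
--         return 10
--     if empties == 3:
--         return 1
--     return 0
--
-- def utilityMatrix(Board):
--     points = [comboPoints([Board[i], Board[j], Board[k]]) for i, j, k in ComboIndices]
--     return [-1 if cell != EMPTY_SIGN else
--             sum(p for p, combo in zip(points, ComboIndices) if c in combo)
--             for c, cell in enumerate(Board)]
-- ===== Notes on version B (the rewrite author's own statement) =====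
-- stated objective: alternative
-- what changed: Replaced the per-combo scatter via a mutating closure (generateAddScore) by a two-pass gather: first compute one points value per combo, then build the result per cell as -1 for occupied cells and the sum of the points of the combos containing that cell otherwise.
import Mathlib
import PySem

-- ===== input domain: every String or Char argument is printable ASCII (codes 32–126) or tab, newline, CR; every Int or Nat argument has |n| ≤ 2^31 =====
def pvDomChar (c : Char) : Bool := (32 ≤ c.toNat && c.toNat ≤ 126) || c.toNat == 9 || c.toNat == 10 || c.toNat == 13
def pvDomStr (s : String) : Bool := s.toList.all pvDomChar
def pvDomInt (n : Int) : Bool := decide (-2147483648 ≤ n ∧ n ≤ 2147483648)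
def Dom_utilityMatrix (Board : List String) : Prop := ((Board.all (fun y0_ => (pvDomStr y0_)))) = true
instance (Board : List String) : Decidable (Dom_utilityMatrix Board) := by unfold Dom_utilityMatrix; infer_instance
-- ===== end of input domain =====

-- B replaces A's per-combo scatter through a mutating closure by a per-combo points list and a
-- per-cell gather (alternative decomposition, same cost; return value only, A mutates no argument).

-- ===== PORT A =====
def pvComboIndices : List (Int × Int × Int) :=
  [(0, 1, 2), (3, 4, 5), (6, 7, 8), (0, 3, 6), (1, 4, 7), (2, 5, 8), (0, 4, 8), (2, 4, 6)]

def pvInitUtilityMatrix (Board : List String) : List Int :=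
  Board.map (fun cell => if cell = "." then 0 else -1)

-- one statement 'if Utilities[x] >= 0: Utilities[x] += points' of A's addScore closure
def pvSetIf (U : List Int) (x points : Int) : List Int :=
  if 0 ≤ PySem.List.pyGetD U x 0 then PySem.List.pySetD U x (PySem.List.pyGetD U x 0 + points) else U

-- A's addScore closure: mutates Utilities at i, j, k in turn when the entry is ≥ 0
def pvAddScore (U : List Int) (i j k : Int) (points : Int) : List Int :=
  pvSetIf (pvSetIf (pvSetIf U i points) j points) k points

def utilityMatrix (Board : List String) : List Int :=
  pvComboIndices.foldl (fun U c =>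
    let i := c.1; let j := c.2.1; let k := c.2.2
    let t := [PySem.List.pyGetD Board i "", PySem.List.pyGetD Board j "", PySem.List.pyGetD Board k ""]
    if t.count "." = 1 then
      if t.count "X" = 2 then pvAddScore U i j k 1000
      else if t.count "O" = 2 then pvAddScore U i j k 100
      else U
    else if t.count "." = 2 ∧ t.count "X" = 1 then pvAddScore U i j k 10
    else if t.count "." = 3 then pvAddScore U i j k 1
    else U) (pvInitUtilityMatrix Board)

-- ===== PORT B =====
def pvComboPoints (t : List String) : Int :=
  let empties := t.count "."
  if empties = 1 then
    if t.count "X" = 2 then 1000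
    else if t.count "O" = 2 then 100
    else 0
  else if empties = 2 ∧ t.count "X" = 1 then 10
  else if empties = 3 then 1
  else 0

def utilityMatrix_alt (Board : List String) : List Int :=
  let points := pvComboIndices.map (fun c =>
    pvComboPoints [PySem.List.pyGetD Board c.1 "", PySem.List.pyGetD Board c.2.1 "", PySem.List.pyGetD Board c.2.2 ""])
  (PySem.List.enumerate Board).map (fun ce =>
    if ce.2 ≠ "." then -1
    else (points.zip pvComboIndices).foldl
      (fun s pc => if ce.1 = pc.2.1 ∨ ce.1 = pc.2.2.1 ∨ ce.1 = pc.2.2.2 then s + pc.1 else s) 0)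

-- ===== PRECONDITION & SPEC =====
-- A indexes Board[0..8] on every run and raises IndexError on boards shorter than 9 (B raises too).
def Pre_utilityMatrix (Board : List String) : Prop := 9 ≤ Board.length
instance (Board : List String) : Decidable (Pre_utilityMatrix Board) := by unfold Pre_utilityMatrix; infer_instance
def pvWitness_utilityMatrix : List String := [".", "X", "O", ".", ".", "X", "O", ".", "."]

def Spec_utilityMatrix (Board : List String) (out : List Int) : Prop := out = utilityMatrix_alt Board
instance (Board : List String) (out : List Int) : Decidable (Spec_utilityMatrix Board out) := by unfold Spec_utilityMatrix; infer_instance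

-- ===== CLAIM (what is proved, stated in full; the proofs are below) =====
def Claim_equal_utilityMatrix : Prop := ∀ (Board : List String), Dom_utilityMatrix Board → Pre_utilityMatrix Board → Spec_utilityMatrix Board (utilityMatrix Board)

-- ===== LEMMAS AND PROOFS =====

-- the common shape of both results: cell c ↦ -1 when occupied, f c when empty
def pvMix (Board : List String) (f : Int → Int) : List Int :=
  (PySem.List.enumerate Board).map (fun ce => if ce.2 = "." then f ce.1 else -1)

theorem pvMix_length (Board : List String) (f : Int → Int) :
    (pvMix Board f).length = Board.length := by
  simp [pvMix, PySem.List.length_enumerate]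

theorem pvMix_getElem? (Board : List String) (f : Int → Int) (n : Nat) :
    (pvMix Board f)[n]? = Board[n]?.map (fun cell => if cell = "." then f n else -1) := by
  simp only [pvMix, List.getElem?_map, PySem.List.getElem?_enumerate, Option.map_map]
  cases Board[n]? <;> simp

theorem pvMix_congr (Board : List String) (f g : Int → Int)
    (h : ∀ n : Nat, n < Board.length → Board[n]! = "." → f n = g n) :
    pvMix Board f = pvMix Board g := by
  apply List.ext_getElem?
  intro n
  rw [pvMix_getElem?, pvMix_getElem?]
  by_cases hn : n < Board.length
  · rw [List.getElem?_eq_getElem hn]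
    by_cases hb : Board[n] = "."
    · have := h n hn (by simp [List.getElem!_eq_getElem?_getD, List.getElem?_eq_getElem hn, hb])
      simp [hb, this]
    · simp [hb]
  · rw [List.getElem?_eq_none (show Board.length ≤ n by omega)]
    simp

-- one conditional write of A's addScore, on a mix-shaped list
theorem pvMix_set (Board : List String) (f : Int → Int) (i p : Int)
    (hi0 : 0 ≤ i) (hi : i.toNat < Board.length) (hfi : 0 ≤ f i) :
    pvSetIf (pvMix Board f) i p
    = pvMix Board (fun c => if c = i then f c + p else f c) := by
  unfold pvSetIf
  have hlen : i.toNat < (pvMix Board f).length := by rw [pvMix_length]; exact hi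
  have hget : PySem.List.pyGetD (pvMix Board f) i 0 = if Board[i.toNat] = "." then f i else -1 := by
    rw [PySem.List.pyGetD_eq_getElem (pvMix Board f) 0 hi0 (by rw [pvMix_length]; omega)]
    have := pvMix_getElem? Board f i.toNat
    rw [List.getElem?_eq_getElem hlen, List.getElem?_eq_getElem hi] at this
    simp only [Option.map_some, Option.some.injEq] at this
    rw [this, Int.toNat_of_nonneg hi0]
  by_cases hb : Board[i.toNat] = "."
  · rw [hget, if_pos hb, if_pos hfi]
    rw [PySem.List.pySetD_of_nonneg _ _ hi0]
    apply List.ext_getElem?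
    intro n
    rw [List.getElem?_set, pvMix_getElem?, pvMix_getElem?]
    by_cases hni : i.toNat = n
    · subst hni
      rw [if_pos rfl, if_pos hlen, List.getElem?_eq_getElem hi]
      simp [hb, Int.toNat_of_nonneg hi0]
    · rw [if_neg hni]
      by_cases hn : n < Board.length
      · rw [List.getElem?_eq_getElem hn]
        have : (n : Int) ≠ i := by
          intro h; apply hni; omega
        simp [this]
      · rw [List.getElem?_eq_none (show Board.length ≤ n by omega)]
        simp
  · rw [hget, if_neg hb, if_neg (by norm_num)]
    apply pvMix_congr
    intro n hn hbn
    have hne : (n : Int) ≠ i := by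
      intro h
      apply hb
      have heq : n = i.toNat := by omega
      have hb' : Board[n]? = some "." := by
        rw [List.getElem?_eq_getElem hn]
        simpa [List.getElem!_eq_getElem?_getD, List.getElem?_eq_getElem hn] using hbn
      rw [heq, List.getElem?_eq_getElem hi] at hb'
      exact Option.some.inj hb'
    simp [hne]

-- a combo is good: indices in [0,9), pairwise distinct
def pvGood (c : Int × Int × Int) : Prop :=
  0 ≤ c.1 ∧ c.1 < 9 ∧ 0 ≤ c.2.1 ∧ c.2.1 < 9 ∧ 0 ≤ c.2.2 ∧ c.2.2 < 9 ∧
  c.1 ≠ c.2.1 ∧ c.1 ≠ c.2.2 ∧ c.2.1 ≠ c.2.2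

theorem pvComboPoints_nonneg (t : List String) : 0 ≤ pvComboPoints t := by
  unfold pvComboPoints
  dsimp only
  split_ifs <;> norm_num

-- A's full addScore, on a mix-shaped list with a good combo
theorem pvAddScore_mix (Board : List String) (f : Int → Int) (i j k p : Int)
    (hlen : 9 ≤ Board.length) (hg : pvGood (i, j, k)) (hp : 0 ≤ p) (hf : ∀ c, 0 ≤ f c) :
    pvAddScore (pvMix Board f) i j k p
    = pvMix Board (fun c => if c = i ∨ c = j ∨ c = k then f c + p else f c) := by
  obtain ⟨hi0, hi9, hj0, hj9, hk0, hk9, hij, hik, hjk⟩ := hg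
  simp only at hi0 hi9 hj0 hj9 hk0 hk9 hij hik hjk
  unfold pvAddScore
  rw [pvMix_set Board f i p hi0 (by omega) (hf i)]
  rw [pvMix_set Board _ j p hj0 (by omega)
    (by split_ifs with h
        · exact add_nonneg (hf j) hp
        · exact hf j)]
  rw [pvMix_set Board _ k p hk0 (by omega)
    (by split_ifs <;>
        first
          | exact add_nonneg (add_nonneg (hf k) hp) hp
          | exact add_nonneg (hf k) hp
          | exact hf k)]
  apply pvMix_congr
  intro n _ _
  by_cases h1 : (n : Int) = i <;> by_cases h2 : (n : Int) = j <;> by_cases h3 : (n : Int) = k <;>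
    simp_all

-- A's loop body
def pvStepA (Board : List String) (U : List Int) (c : Int × Int × Int) : List Int :=
  let i := c.1; let j := c.2.1; let k := c.2.2
  let t := [PySem.List.pyGetD Board i "", PySem.List.pyGetD Board j "", PySem.List.pyGetD Board k ""]
  if t.count "." = 1 then
    if t.count "X" = 2 then pvAddScore U i j k 1000
    else if t.count "O" = 2 then pvAddScore U i j k 100
    else U
  else if t.count "." = 2 ∧ t.count "X" = 1 then pvAddScore U i j k 10
  else if t.count "." = 3 then pvAddScore U i j k 1
  else U

def pvPts (Board : List String) (c : Int × Int × Int) : Int :=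
  pvComboPoints [PySem.List.pyGetD Board c.1 "", PySem.List.pyGetD Board c.2.1 "", PySem.List.pyGetD Board c.2.2 ""]

theorem pvStepA_mix (Board : List String) (f : Int → Int) (c : Int × Int × Int)
    (hlen : 9 ≤ Board.length) (hg : pvGood c) (hf : ∀ x, 0 ≤ f x) :
    pvStepA Board (pvMix Board f) c
    = pvMix Board (fun x => if x = c.1 ∨ x = c.2.1 ∨ x = c.2.2 then f x + pvPts Board c else f x) := by
  obtain ⟨i, j, k⟩ := c
  set t : List String :=
    [PySem.List.pyGetD Board i "", PySem.List.pyGetD Board j "", PySem.List.pyGetD Board k ""] with ht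
  have hpts : pvPts Board (i, j, k) = pvComboPoints t := rfl
  unfold pvStepA
  dsimp only
  rw [← ht]
  by_cases h1 : t.count "." = 1
  · by_cases h2 : t.count "X" = 2
    · rw [if_pos h1, if_pos h2, pvAddScore_mix Board f i j k 1000 hlen hg (by norm_num) hf]
      have : pvPts Board (i, j, k) = 1000 := by rw [hpts]; unfold pvComboPoints; simp [h1, h2]
      rw [this]
    · by_cases h3 : t.count "O" = 2
      · rw [if_pos h1, if_neg h2, if_pos h3, pvAddScore_mix Board f i j k 100 hlen hg (by norm_num) hf]
        have : pvPts Board (i, j, k) = 100 := by rw [hpts]; unfold pvComboPoints; simp [h1, h2, h3]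
        rw [this]
      · rw [if_pos h1, if_neg h2, if_neg h3]
        have : pvPts Board (i, j, k) = 0 := by rw [hpts]; unfold pvComboPoints; simp [h1, h2, h3]
        rw [this]
        apply pvMix_congr
        intro n _ _
        by_cases h : ((n : Int) = i ∨ (n : Int) = j ∨ (n : Int) = k) <;> simp [h]
  · by_cases h2 : t.count "." = 2 ∧ t.count "X" = 1
    · rw [if_neg h1, if_pos h2, pvAddScore_mix Board f i j k 10 hlen hg (by norm_num) hf]
      have : pvPts Board (i, j, k) = 10 := by
        rw [hpts]; unfold pvComboPoints; simp [h2.1, h2.2]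
      rw [this]
    · by_cases h3 : t.count "." = 3
      · rw [if_neg h1, if_neg h2, if_pos h3, pvAddScore_mix Board f i j k 1 hlen hg (by norm_num) hf]
        have : pvPts Board (i, j, k) = 1 := by rw [hpts]; unfold pvComboPoints; simp [h3]
        rw [this]
      · rw [if_neg h1, if_neg h2, if_neg h3]
        have : pvPts Board (i, j, k) = 0 := by
          rw [hpts]; unfold pvComboPoints
          rw [if_neg h1]
          rw [if_neg (by tauto), if_neg h3]
        rw [this]
        apply pvMix_congr
        intro n _ _
        by_cases h : ((n : Int) = i ∨ (n : Int) = j ∨ (n : Int) = k) <;> simp [h]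

theorem pvLoop_mix (Board : List String) (hlen : 9 ≤ Board.length) :
    ∀ (L : List (Int × Int × Int)) (f : Int → Int), (∀ x, 0 ≤ f x) → (∀ c ∈ L, pvGood c) →
    L.foldl (pvStepA Board) (pvMix Board f)
    = pvMix Board (fun x => L.foldl
        (fun s c => if x = c.1 ∨ x = c.2.1 ∨ x = c.2.2 then s + pvPts Board c else s) (f x)) := by
  intro L
  induction L with
  | nil => intro f _ _; rfl
  | cons c L ih =>
    intro f hf hG
    rw [List.foldl_cons, pvStepA_mix Board f c hlen (hG c (by simp)) hf]
    rw [ih _ (by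
        intro x
        by_cases h : (x = c.1 ∨ x = c.2.1 ∨ x = c.2.2)
        · simp only [h, if_true]
          exact add_nonneg (hf x) (pvComboPoints_nonneg _)
        · simp only [h, if_false]
          exact hf x)
      (fun c' hc' => hG c' (by simp [hc']))]
    apply pvMix_congr
    intro n _ _
    rw [List.foldl_cons]

theorem pvInit_eq_mix (Board : List String) :
    pvInitUtilityMatrix Board = pvMix Board (fun _ => 0) := by
  apply List.ext_getElem?
  intro n
  rw [pvMix_getElem?]
  simp [pvInitUtilityMatrix]

theorem pvZip_map_self {α β : Type} (g : α → β) :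
    ∀ (L : List α), (L.map g).zip L = L.map (fun x => (g x, x)) := by
  intro L
  induction L with
  | nil => rfl
  | cons x L ih => simp [ih]

theorem pvAlt_eq_mix (Board : List String) :
    utilityMatrix_alt Board
    = pvMix Board (fun x => pvComboIndices.foldl
        (fun s c => if x = c.1 ∨ x = c.2.1 ∨ x = c.2.2 then s + pvPts Board c else s) 0) := by
  unfold utilityMatrix_alt pvMix
  dsimp only
  rw [pvZip_map_self]
  apply List.map_congr_left
  intro ce _
  rw [List.foldl_map]
  by_cases h : ce.2 = "." <;> simp [h, pvPts]

theorem pvGood_all : ∀ c ∈ pvComboIndices, pvGood c := by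
  intro c hc
  fin_cases hc <;> (unfold pvGood; norm_num)

-- ===== VERDICT (by name: the statement is the Claim_ definition above) =====
theorem utilityMatrix_spec : Claim_equal_utilityMatrix := by
  intro Board _ hpre
  unfold Spec_utilityMatrix utilityMatrix
  have hA : pvComboIndices.foldl (fun U c =>
      let i := c.1; let j := c.2.1; let k := c.2.2
      let t := [PySem.List.pyGetD Board i "", PySem.List.pyGetD Board j "", PySem.List.pyGetD Board k ""]
      if t.count "." = 1 then
        if t.count "X" = 2 then pvAddScore U i j k 1000
        else if t.count "O" = 2 then pvAddScore U i j k 100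
        else U
      else if t.count "." = 2 ∧ t.count "X" = 1 then pvAddScore U i j k 10
      else if t.count "." = 3 then pvAddScore U i j k 1
      else U) (pvInitUtilityMatrix Board)
      = pvComboIndices.foldl (pvStepA Board) (pvMix Board (fun _ => 0)) := by
    rw [pvInit_eq_mix]; rfl
  rw [hA, pvLoop_mix Board hpre pvComboIndices (fun _ => 0) (fun _ => le_refl 0) pvGood_all,
    pvAlt_eq_mix]
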